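-- pv_equiv track=rewrite | github.com/Elvich/Algorithms-and-data-structures | Term 2/Para 28.04.2025/Four.py | remove_negatives
-- ===== SOURCE A (Python) =====
-- def remove_negatives(stack):
--     temp_stack = []
--     while stack:
--         element = stack.pop()
--         if element >= 0:
--             temp_stack.append(element)
--     while temp_stack:
--         stack.append(temp_stack.pop())
--     return stack
-- ===== SOURCE B (Python) =====
-- def remove_negatives(stack):
--     write = 0
--     for read in range(len(stack)):
--         if stack[read] >= 0:
--             stack[write] = stack[read]
--             write += 1
--     del stack[write:]
--     return stack
-- ===== Notes on version B (the rewrite author's own statement) =====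
-- stated objective: alternative
-- what changed: Replaced the pop-everything-into-a-temp-stack-and-pop-back double reversal with a single-pass in-place two-pointer compaction (write cursor + truncation), removing the auxiliary stack.
import Mathlib
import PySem

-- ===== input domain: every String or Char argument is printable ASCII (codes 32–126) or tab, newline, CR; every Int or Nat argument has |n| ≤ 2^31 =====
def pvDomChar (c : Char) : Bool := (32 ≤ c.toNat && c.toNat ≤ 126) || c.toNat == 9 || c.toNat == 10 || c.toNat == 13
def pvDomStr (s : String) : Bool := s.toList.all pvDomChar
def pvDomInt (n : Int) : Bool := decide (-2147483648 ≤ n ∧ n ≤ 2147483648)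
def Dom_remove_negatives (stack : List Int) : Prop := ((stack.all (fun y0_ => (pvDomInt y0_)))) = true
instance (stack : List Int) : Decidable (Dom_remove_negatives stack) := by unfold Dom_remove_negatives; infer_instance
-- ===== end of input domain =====

-- B replaces A's two pop-based passes through an auxiliary temp stack with a single
-- in-place two-pointer compaction (write cursor + truncation); the return value is proved
-- equal (both Pythons mutate the argument list in place, leaving it equal to the result).

-- ===== PORT A =====
-- while stack: element = stack.pop(); if element >= 0: temp_stack.append(element)
def rnLoop1 (stack temp : List Int) : List Int :=
  if h : stack = [] then temp
  else
    let element := stack.getLast h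
    rnLoop1 stack.dropLast (if element ≥ 0 then temp ++ [element] else temp)
termination_by stack.length
decreasing_by
  have := List.length_pos_iff.mpr h
  simp [List.length_dropLast]; omega

-- while temp_stack: stack.append(temp_stack.pop())
def rnLoop2 (temp stack : List Int) : List Int :=
  if h : temp = [] then stack
  else rnLoop2 temp.dropLast (stack ++ [temp.getLast h])
termination_by temp.length
decreasing_by
  have := List.length_pos_iff.mpr h
  simp [List.length_dropLast]; omega

def remove_negatives (stack : List Int) : List Int :=
  rnLoop2 (rnLoop1 stack []) []   -- after the first loop the argument list is empty

-- ===== PORT B =====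
-- for read in range(len(stack)): if stack[read] >= 0: stack[write] = stack[read]; write += 1
-- then del stack[write:]; return stack
def remove_negatives_alt (stack : List Int) : List Int :=
  let st := (PySem.List.pyRange 0 (stack.length : Int) 1).foldl
    (fun (p : List Int × Nat) read =>
      if PySem.List.pyGetD p.1 read 0 ≥ 0 then
        (p.1.set p.2 (PySem.List.pyGetD p.1 read 0), p.2 + 1)
      else p)
    (stack, 0)
  st.1.take st.2

-- ===== PRECONDITION & SPEC =====
def Spec_remove_negatives (stack : List Int) (out : List Int) : Prop := out = remove_negatives_alt stack
instance (stack : List Int) (out : List Int) : Decidable (Spec_remove_negatives stack out) := by unfold Spec_remove_negatives; infer_instance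

-- ===== CLAIM (what is proved, stated in full; the proofs are below) =====
def Claim_equal_remove_negatives : Prop := ∀ (stack : List Int), Dom_remove_negatives stack → Spec_remove_negatives stack (remove_negatives stack)

-- ===== LEMMAS AND PROOFS =====

theorem rnLoop1_eq (s : List Int) : ∀ temp,
    rnLoop1 s temp = temp ++ ((s.filter (fun x => decide (0 ≤ x))).reverse) := by
  induction s using List.reverseRecOn with
  | nil => intro temp; simp [rnLoop1]
  | append_singleton xs x ih =>
    intro temp
    rw [rnLoop1]
    simp only [dif_neg (by simp : xs ++ [x] ≠ ([] : List Int)),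
      List.getLast_append, List.dropLast_concat]
    rw [ih]
    by_cases hx : (0:Int) ≤ x
    · simp [List.filter_append, hx, ge_iff_le]
    · simp [List.filter_append, hx, ge_iff_le]

theorem rnLoop2_eq (t : List Int) : ∀ st, rnLoop2 t st = st ++ t.reverse := by
  induction t using List.reverseRecOn with
  | nil => intro st; simp [rnLoop2]
  | append_singleton xs x ih =>
    intro st
    rw [rnLoop2]
    simp only [dif_neg (by simp : xs ++ [x] ≠ ([] : List Int)),
      List.getLast_append, List.dropLast_concat]
    rw [ih]; simp

theorem remove_negatives_eq_filter (s : List Int) :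
    remove_negatives s = s.filter (fun x => decide (0 ≤ x)) := by
  unfold remove_negatives
  rw [rnLoop1_eq, rnLoop2_eq]
  simp

-- take (w+1) of a set at w is the old prefix plus the new element
theorem take_succ_set (l : List Int) (w : Nat) (v : Int) (h : w < l.length) :
    (l.set w v).take (w+1) = l.take w ++ [v] := by
  rw [List.set_eq_take_append_cons_drop, if_pos h]
  have hlen : (l.take w).length = w := by simp; omega
  rw [List.take_append, hlen]
  simp [List.take_take]

-- the invariant of B's fold: after processing indices < k, the first w cells hold the
-- filtered prefix, cells ≥ k are untouched
theorem alt_inv (s : List Int) : ∀ (k w : Nat) (l : List Int),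
    w ≤ k → k ≤ s.length → l.length = s.length →
    l.take w = (s.take k).filter (fun x => decide (0 ≤ x)) →
    l.drop k = s.drop k →
    (let st := (PySem.List.pyRange (k : Int) (s.length : Int) 1).foldl
        (fun (p : List Int × Nat) read =>
          if PySem.List.pyGetD p.1 read 0 ≥ 0 then
            (p.1.set p.2 (PySem.List.pyGetD p.1 read 0), p.2 + 1)
          else p)
        (l, w);
      st.1.take st.2) = s.filter (fun x => decide (0 ≤ x)) := by
  intro k
  induction hk : s.length - k using Nat.strong_induction_on generalizing k with
  | _ n ih =>
    intro w l hwk hks hlen htake hdrop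
    by_cases hlt : k < s.length
    · -- peel one index
      rw [PySem.List.pyRange_one_cons (by exact_mod_cast hlt)]
      simp only [List.foldl_cons]
      have hkl : k < l.length := by omega
      have hval : PySem.List.pyGetD l (k : Int) 0 = s[k] := by
        rw [PySem.List.pyGetD_natCast]
        have : l[k] = s[k] := by
          have h1 : l[k] = (l.drop k).head (by simp [List.drop_eq_nil_iff]; omega) := by
            simp [List.head_drop]
          have h2 : s[k] = (s.drop k).head (by simp [List.drop_eq_nil_iff]; omega) := by
            simp [List.head_drop]
          rw [h1, h2]; congr 1
        simp [List.getD_eq_getElem?_getD, List.getElem?_eq_getElem hkl, this]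
      have htail : l.drop (k+1) = s.drop (k+1) := by
        have : (l.drop k).tail = (s.drop k).tail := by rw [hdrop]
        simpa [List.tail_drop] using this
      have hsk : s.take (k+1) = s.take k ++ [s[k]] := by
        rw [List.take_add_one, List.getElem?_eq_getElem hlt]; rfl
      by_cases hpos : (0:Int) ≤ s[k]
      · rw [hval, if_pos (by exact_mod_cast hpos)]
        have hw : w < l.length := by omega
        have hcast : ((k : Int) + 1) = ((k+1 : Nat) : Int) := by push_cast; ring
        rw [hcast]
        refine ih (s.length - (k+1)) (by omega) (k+1) rfl (w+1) (l.set w s[k])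
          (by omega) (by omega) (by simp [hlen]) ?_ ?_
        · rw [take_succ_set l w s[k] hw, htake, hsk, List.filter_append]
          simp [hpos]
        · rw [List.drop_set_of_lt (by omega), htail]
      · rw [hval, if_neg (by exact_mod_cast hpos)]
        have hcast : ((k : Int) + 1) = ((k+1 : Nat) : Int) := by push_cast; ring
        rw [hcast]
        refine ih (s.length - (k+1)) (by omega) (k+1) rfl w l (by omega) (by omega) hlen ?_ htail
        rw [htake, hsk, List.filter_append]
        simp [hpos]
    · -- done: k = s.length
      have hkeq : k = s.length := by omega
      rw [PySem.List.pyRange_one_eq_nil (by omega)]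
      simp only [List.foldl_nil]
      rw [htake, hkeq, List.take_length]

theorem remove_negatives_alt_eq_filter (s : List Int) :
    remove_negatives_alt s = s.filter (fun x => decide (0 ≤ x)) := by
  unfold remove_negatives_alt
  have := alt_inv s 0 0 s (le_refl 0) (Nat.zero_le _) rfl (by simp) (by simp)
  simpa using this

-- ===== VERDICT (by name: the statement is the Claim_ definition above) =====
theorem remove_negatives_spec : Claim_equal_remove_negatives := by
  intro stack _
  unfold Spec_remove_negatives
  rw [remove_negatives_eq_filter, remove_negatives_alt_eq_filter]
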